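-- pv_equiv track=rewrite | github.com/open-experiments/aiops-nextgen | src/api-gateway/app/services/rbac.py | resolve_role
-- ===== SOURCE A (Python) =====
-- from enum import Enum
--
-- class Role(str, Enum):
--     """User roles with hierarchical permissions."""
--
--     ADMIN = "admin"
--     OPERATOR = "operator"
--     VIEWER = "viewer"
--
-- GROUP_ROLE_MAPPING: dict[str, Role] = {
--     "cluster-admins": Role.ADMIN,
--     "aiops-admins": Role.ADMIN,
--     "aiops-operators": Role.OPERATOR,
--     "aiops-viewers": Role.VIEWER,
-- }
--
-- def resolve_role(groups: list[str]) -> Role: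
--     """Resolve user role from OpenShift groups.
--
--     Returns the highest privilege role matched from user groups.
--     Defaults to VIEWER if no matching group found.
--     """
--     resolved_role = Role.VIEWER
--
--     # Priority order: ADMIN > OPERATOR > VIEWER
--     role_priority = {Role.ADMIN: 3, Role.OPERATOR: 2, Role.VIEWER: 1}
--
--     for group in groups:
--         if group in GROUP_ROLE_MAPPING:
--             mapped_role = GROUP_ROLE_MAPPING[group]
--             if role_priority[mapped_role] > role_priority[resolved_role]:
--                 resolved_role = mapped_role
--
--     return resolved_role
-- ===== SOURCE B (Python) =====
-- ADMIN_GROUPS = frozenset({"cluster-admins", "aiops-admins"})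
-- OPERATOR_GROUPS = frozenset({"aiops-operators"})
--
-- def resolve_role(groups: list[str]) -> str:
--     """Priority-ordered set checks: admin, then operator, else viewer."""
--     gs = set(groups)
--     if gs & ADMIN_GROUPS:
--         return "admin"
--     if gs & OPERATOR_GROUPS:
--         return "operator"
--     return "viewer"
-- ===== Notes on version B (the rewrite author's own statement) =====
-- stated objective: simpler
-- what changed: Replaced the max-priority tracking loop over a group-to-role dict with a reverse index (one group-set per role) tested in priority order with early returns.
import Mathlib
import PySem

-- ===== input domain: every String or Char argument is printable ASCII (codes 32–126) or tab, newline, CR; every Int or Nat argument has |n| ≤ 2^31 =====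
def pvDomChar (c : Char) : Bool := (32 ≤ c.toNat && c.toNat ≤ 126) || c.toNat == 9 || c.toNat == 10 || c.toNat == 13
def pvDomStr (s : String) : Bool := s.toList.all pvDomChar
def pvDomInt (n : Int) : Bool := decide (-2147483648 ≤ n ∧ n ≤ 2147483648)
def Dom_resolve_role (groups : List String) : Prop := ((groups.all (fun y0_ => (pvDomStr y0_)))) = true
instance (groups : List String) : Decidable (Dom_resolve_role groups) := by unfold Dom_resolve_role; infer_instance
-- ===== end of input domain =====

-- B replaces A's max-priority tracking loop with a reverse index (one group-set per role)
-- tested in priority order with early returns (objective: simpler).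

-- ===== PORT A =====
-- Role enum values are represented by their underlying strings ("admin"/"operator"/"viewer").
def GROUP_ROLE_MAPPING : PySem.Dict String String :=
  PySem.Dict.ofList [("cluster-admins", "admin"), ("aiops-admins", "admin"),
                     ("aiops-operators", "operator"), ("aiops-viewers", "viewer")]

def role_priority (r : String) : Int :=
  if r == "admin" then 3 else if r == "operator" then 2 else 1

def resolve_role (groups : List String) : String :=
  groups.foldl (fun resolved_role group =>
    if GROUP_ROLE_MAPPING.contains group then
      let mapped_role := (GROUP_ROLE_MAPPING.get? group).getD ""
      if role_priority mapped_role > role_priority resolved_role then mapped_role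
      else resolved_role
    else resolved_role) "viewer"

-- ===== PORT B =====
def ADMIN_GROUPS : PySem.Set String := PySem.Set.ofList ["cluster-admins", "aiops-admins"]
def OPERATOR_GROUPS : PySem.Set String := PySem.Set.ofList ["aiops-operators"]

def resolve_role_alt (groups : List String) : String :=
  let gs := PySem.Set.ofList groups
  if !(PySem.Set.inter gs ADMIN_GROUPS).isEmpty then "admin"
  else if !(PySem.Set.inter gs OPERATOR_GROUPS).isEmpty then "operator"
  else "viewer"

-- ===== PRECONDITION & SPEC =====
def Spec_resolve_role (groups : List String) (out : String) : Prop := out = resolve_role_alt groups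
instance (groups : List String) (out : String) : Decidable (Spec_resolve_role groups out) := by unfold Spec_resolve_role; infer_instance

-- ===== CLAIM (what is proved, stated in full; the proofs are below) =====
def Claim_equal_resolve_role : Prop := ∀ (groups : List String), Dom_resolve_role groups → Spec_resolve_role groups (resolve_role groups)

-- ===== LEMMAS AND PROOFS =====

-- the loop body of A, named for the proofs
def step (resolved_role group : String) : String :=
  if GROUP_ROLE_MAPPING.contains group then
    let mapped_role := (GROUP_ROLE_MAPPING.get? group).getD ""
    if role_priority mapped_role > role_priority resolved_role then mapped_role
    else resolved_role
  else resolved_role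

lemma resolve_role_eq_foldl (groups : List String) :
    resolve_role groups = groups.foldl step "viewer" := rfl

def hasAdmin (groups : List String) : Bool :=
  groups.any (fun g => g == "cluster-admins" || g == "aiops-admins")

def hasOp (groups : List String) : Bool :=
  groups.any (fun g => g == "aiops-operators")

lemma get_char (g : String) : GROUP_ROLE_MAPPING.get? g =
    if g = "aiops-viewers" then some "viewer"
    else if g = "aiops-operators" then some "operator"
    else if g = "aiops-admins" then some "admin"
    else if g = "cluster-admins" then some "admin"
    else none := by
  simp only [GROUP_ROLE_MAPPING, PySem.Dict.ofList, PySem.Dict.update, List.foldl_cons,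
    List.foldl_nil, PySem.Dict.get?_insert, PySem.Dict.get?_empty]

lemma contains_char (g : String) : GROUP_ROLE_MAPPING.contains g =
    (decide (g = "cluster-admins") || decide (g = "aiops-admins") ||
     decide (g = "aiops-operators") || decide (g = "aiops-viewers")) := by
  rw [PySem.Dict.contains_eq_isSome_get?, get_char]
  split_ifs <;> simp_all

lemma step_admin (g : String) : step "admin" g = "admin" := by
  simp only [step, contains_char, get_char]
  split_ifs <;> simp_all [role_priority]

lemma step_op (g : String) :
    step "operator" g = if g = "cluster-admins" ∨ g = "aiops-admins" then "admin" else "operator" := by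
  simp only [step, contains_char, get_char]
  split_ifs <;> simp_all [role_priority]

lemma step_viewer (g : String) :
    step "viewer" g = if g = "cluster-admins" ∨ g = "aiops-admins" then "admin"
      else if g = "aiops-operators" then "operator" else "viewer" := by
  simp only [step, contains_char, get_char]
  split_ifs <;> simp_all [role_priority]

lemma foldl_admin (gs : List String) : gs.foldl step "admin" = "admin" := by
  induction gs with
  | nil => rfl
  | cons g gs ih => rw [List.foldl_cons, step_admin]; exact ih

lemma foldl_op (gs : List String) :
    gs.foldl step "operator" = if hasAdmin gs then "admin" else "operator" := by
  induction gs with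
  | nil => rfl
  | cons g gs ih =>
    rw [List.foldl_cons, step_op]
    by_cases h : g = "cluster-admins" ∨ g = "aiops-admins"
    · rcases h with h | h <;> subst h <;> simp [foldl_admin, hasAdmin]
    · push Not at h
      simp [h.1, h.2, ih, hasAdmin]

lemma foldl_viewer (gs : List String) :
    gs.foldl step "viewer" =
      if hasAdmin gs then "admin" else if hasOp gs then "operator" else "viewer" := by
  induction gs with
  | nil => rfl
  | cons g gs ih =>
    rw [List.foldl_cons, step_viewer]
    by_cases h : g = "cluster-admins" ∨ g = "aiops-admins"
    · rcases h with h | h <;> subst h <;> simp [foldl_admin, hasAdmin]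
    · push Not at h
      by_cases h3 : g = "aiops-operators"
      · subst h3; simp [foldl_op, hasAdmin, hasOp]
      · simp [h.1, h.2, h3, ih, hasAdmin, hasOp]

lemma interA_char (groups : List String) :
    (PySem.Set.inter (PySem.Set.ofList groups) ADMIN_GROUPS).isEmpty = !(hasAdmin groups) := by
  have hA : ADMIN_GROUPS = ["cluster-admins", "aiops-admins"] := by decide
  cases hb : hasAdmin groups with
  | true =>
    simp only [hasAdmin, List.any_eq_true] at hb
    obtain ⟨x, hx, hor⟩ := hb
    have hxmem : x ∈ PySem.Set.inter (PySem.Set.ofList groups) ADMIN_GROUPS := by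
      rw [PySem.Set.mem_inter]
      refine ⟨(PySem.Set.mem_ofList _ _).2 hx, ?_⟩
      rw [hA]
      simp only [Bool.or_eq_true, beq_iff_eq] at hor
      rcases hor with h | h <;> simp [h]
    have hne := List.ne_nil_of_mem hxmem
    simpa [List.isEmpty_iff] using hne
  | false =>
    simp only [Bool.not_false, List.isEmpty_iff, List.eq_nil_iff_forall_not_mem]
    intro x hx
    rw [PySem.Set.mem_inter] at hx
    have hxg : x ∈ groups := (PySem.Set.mem_ofList _ _).1 hx.1
    have hxA : x = "cluster-admins" ∨ x = "aiops-admins" := by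
      have h2 := hx.2
      rw [hA] at h2
      simpa using h2
    simp only [hasAdmin, List.any_eq_false] at hb
    have hfx := hb x hxg
    rcases hxA with h | h <;> simp [h] at hfx

lemma interO_char (groups : List String) :
    (PySem.Set.inter (PySem.Set.ofList groups) OPERATOR_GROUPS).isEmpty = !(hasOp groups) := by
  have hO : OPERATOR_GROUPS = ["aiops-operators"] := by decide
  cases hb : hasOp groups with
  | true =>
    simp only [hasOp, List.any_eq_true] at hb
    obtain ⟨x, hx, hor⟩ := hb
    have hxmem : x ∈ PySem.Set.inter (PySem.Set.ofList groups) OPERATOR_GROUPS := by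
      rw [PySem.Set.mem_inter]
      refine ⟨(PySem.Set.mem_ofList _ _).2 hx, ?_⟩
      rw [hO]
      simp only [beq_iff_eq] at hor
      simp [hor]
    have hne := List.ne_nil_of_mem hxmem
    simpa [List.isEmpty_iff] using hne
  | false =>
    simp only [Bool.not_false, List.isEmpty_iff, List.eq_nil_iff_forall_not_mem]
    intro x hx
    rw [PySem.Set.mem_inter] at hx
    have hxg : x ∈ groups := (PySem.Set.mem_ofList _ _).1 hx.1
    have hxO : x = "aiops-operators" := by
      have h2 := hx.2
      rw [hO] at h2
      simpa using h2
    simp only [hasOp, List.any_eq_false] at hb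
    have hfx := hb x hxg
    simp [hxO] at hfx

lemma alt_char (groups : List String) :
    resolve_role_alt groups =
      if hasAdmin groups then "admin" else if hasOp groups then "operator" else "viewer" := by
  simp only [resolve_role_alt, interA_char, interO_char, Bool.not_not]

-- ===== VERDICT (by name: the statement is the Claim_ definition above) =====
theorem resolve_role_spec : Claim_equal_resolve_role := by
  intro groups _
  show resolve_role groups = resolve_role_alt groups
  rw [resolve_role_eq_foldl, foldl_viewer, alt_char]
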